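-- pv_equiv track=rewrite | github.com/ngocthinh09/Streamlit-Tutorial | anylyzing_score_data_app/app.py | percentage_distribution
-- ===== SOURCE A (Python) =====
-- def percentage_distribution(scores):
--     bins = {"90-100": 0,
--             "80-89":  0,
--             "70-79":  0,
--             "60-69":  0,
--             "<60":    0}
--     for score in scores:
--         if score >= 90:
--             bins["90-100"] += 1
--         elif score >= 80:
--             bins["80-89"] += 1
--         elif score >= 70:
--             bins["70-79"] += 1
--         elif score >= 60:
--             bins["60-69"] += 1
--         else:
--             bins["<60"] += 1
--     return bins
-- ===== SOURCE B (Python) =====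
-- def percentage_distribution(scores):
--     at_least = lambda t: sum(1 for s in scores if s >= t)
--     g90, g80, g70, g60 = at_least(90), at_least(80), at_least(70), at_least(60)
--     return {"90-100": g90,
--             "80-89":  g80 - g90,
--             "70-79":  g70 - g80,
--             "60-69":  g60 - g70,
--             "<60":    len(scores) - g60}
-- ===== Notes on version B (the rewrite author's own statement) =====
-- stated objective: alternative
-- what changed: Replaces the single pass with a five-way comparison cascade into a dict by cumulative threshold counting: four independent counting passes (number of scores >= 90/80/70/60) and each bin computed as a difference of adjacent cumulative counts, with no per-score bin selection at all.
import Mathlib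
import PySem

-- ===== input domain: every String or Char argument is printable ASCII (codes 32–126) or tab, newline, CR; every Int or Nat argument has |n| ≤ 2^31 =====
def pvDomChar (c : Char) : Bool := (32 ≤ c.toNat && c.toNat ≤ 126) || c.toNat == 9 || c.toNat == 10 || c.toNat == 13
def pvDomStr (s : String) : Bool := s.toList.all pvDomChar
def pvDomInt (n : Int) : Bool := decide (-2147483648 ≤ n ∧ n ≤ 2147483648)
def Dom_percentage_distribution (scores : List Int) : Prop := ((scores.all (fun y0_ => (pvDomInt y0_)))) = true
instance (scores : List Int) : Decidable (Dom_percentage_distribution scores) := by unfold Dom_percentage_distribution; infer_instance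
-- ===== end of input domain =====

-- B replaces A's per-score comparison cascade into a dict by cumulative threshold counting:
-- four counting passes (scores >= 90/80/70/60), each bin a difference of adjacent counts (alternative structure, same cost).

-- ===== PORT A =====
def pdStepA (b : PySem.Dict String Int) (score : Int) : PySem.Dict String Int :=
  if score ≥ 90 then b.modify "90-100" 0 (· + 1)
  else if score ≥ 80 then b.modify "80-89" 0 (· + 1)
  else if score ≥ 70 then b.modify "70-79" 0 (· + 1)
  else if score ≥ 60 then b.modify "60-69" 0 (· + 1)
  else b.modify "<60" 0 (· + 1)

def percentage_distribution (scores : List Int) : List (String × Int) :=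
  (scores.foldl pdStepA
    (PySem.Dict.mk [("90-100", 0), ("80-89", 0), ("70-79", 0), ("60-69", 0), ("<60", 0)])).items

-- ===== PORT B =====
-- at_least t = sum(1 for s in scores if s >= t)
def pdAtLeast (scores : List Int) (t : Int) : Int :=
  (scores.countP (fun s => t ≤ s) : Nat)

def percentage_distribution_alt (scores : List Int) : List (String × Int) :=
  let g90 := pdAtLeast scores 90
  let g80 := pdAtLeast scores 80
  let g70 := pdAtLeast scores 70
  let g60 := pdAtLeast scores 60
  [("90-100", g90), ("80-89", g80 - g90), ("70-79", g70 - g80),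
   ("60-69", g60 - g70), ("<60", (scores.length : Int) - g60)]

-- ===== PRECONDITION & SPEC =====
def Spec_percentage_distribution (scores : List Int) (out : List (String × Int)) : Prop := out = percentage_distribution_alt scores
instance (scores : List Int) (out : List (String × Int)) : Decidable (Spec_percentage_distribution scores out) := by unfold Spec_percentage_distribution; infer_instance

-- ===== CLAIM (what is proved, stated in full; the proofs are below) =====
def Claim_equal_percentage_distribution : Prop := ∀ (scores : List Int), Dom_percentage_distribution scores → Spec_percentage_distribution scores (percentage_distribution scores)

-- ===== LEMMAS AND PROOFS =====

lemma pd_loop_eq (scores : List Int) (a b c d e : Int) :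
    (scores.foldl pdStepA
      (PySem.Dict.mk [("90-100", a), ("80-89", b), ("70-79", c), ("60-69", d), ("<60", e)])).items
    = [("90-100", a + pdAtLeast scores 90),
       ("80-89", b + (pdAtLeast scores 80 - pdAtLeast scores 90)),
       ("70-79", c + (pdAtLeast scores 70 - pdAtLeast scores 80)),
       ("60-69", d + (pdAtLeast scores 60 - pdAtLeast scores 70)),
       ("<60", e + ((scores.length : Int) - pdAtLeast scores 60))] := by
  induction scores generalizing a b c d e with
  | nil => simp [pdAtLeast]
  | cons s rest ih =>
    simp only [List.foldl_cons]
    have hcnt : ∀ t : Int, pdAtLeast (s :: rest) t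
        = pdAtLeast rest t + (if t ≤ s then 1 else 0) := by
      intro t
      by_cases h : t ≤ s
      · simp [pdAtLeast, h]
      · simp [pdAtLeast, h]
    have hlen : ((s :: rest).length : Int) = (rest.length : Int) + 1 := by
      simp
    rcases le_or_gt 90 s with h90 | h90
    · have hA : pdStepA (PySem.Dict.mk [("90-100", a), ("80-89", b), ("70-79", c), ("60-69", d), ("<60", e)]) s = PySem.Dict.mk [("90-100", a + 1), ("80-89", b), ("70-79", c), ("60-69", d), ("<60", e)] := by
        simp [pdStepA, h90, PySem.Dict.modify, PySem.Dict.contains, PySem.Dict.insert, PySem.Dict.getD, PySem.Dict.get?_mk_cons]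
      rw [hA, ih]
      simp only [hcnt, hlen, (show (90:Int) ≤ s from h90), (show (80:Int) ≤ s by omega),
        (show (70:Int) ≤ s by omega), (show (60:Int) ≤ s by omega), if_pos]
      norm_num; omega
    · rcases le_or_gt 80 s with h80 | h80
      · have hA : pdStepA (PySem.Dict.mk [("90-100", a), ("80-89", b), ("70-79", c), ("60-69", d), ("<60", e)]) s = PySem.Dict.mk [("90-100", a), ("80-89", b + 1), ("70-79", c), ("60-69", d), ("<60", e)] := by
          simp [pdStepA, h80, (show ¬(90:Int) ≤ s by omega), PySem.Dict.modify, PySem.Dict.contains, PySem.Dict.insert, PySem.Dict.getD, PySem.Dict.get?_mk_cons]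
        rw [hA, ih]
        simp only [hcnt, hlen]
        rw [if_neg (by omega), if_pos (by omega), if_pos (by omega), if_pos (by omega)]
        norm_num; omega
      · rcases le_or_gt 70 s with h70 | h70
        · have hA : pdStepA (PySem.Dict.mk [("90-100", a), ("80-89", b), ("70-79", c), ("60-69", d), ("<60", e)]) s = PySem.Dict.mk [("90-100", a), ("80-89", b), ("70-79", c + 1), ("60-69", d), ("<60", e)] := by
            simp [pdStepA, h70, (show ¬(90:Int) ≤ s by omega), (show ¬(80:Int) ≤ s by omega), PySem.Dict.modify, PySem.Dict.contains, PySem.Dict.insert, PySem.Dict.getD, PySem.Dict.get?_mk_cons]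
          rw [hA, ih]
          simp only [hcnt, hlen]
          rw [if_neg (by omega), if_neg (by omega), if_pos (by omega), if_pos (by omega)]
          norm_num; omega
        · rcases le_or_gt 60 s with h60 | h60
          · have hA : pdStepA (PySem.Dict.mk [("90-100", a), ("80-89", b), ("70-79", c), ("60-69", d), ("<60", e)]) s = PySem.Dict.mk [("90-100", a), ("80-89", b), ("70-79", c), ("60-69", d + 1), ("<60", e)] := by
              simp [pdStepA, h60, (show ¬(90:Int) ≤ s by omega), (show ¬(80:Int) ≤ s by omega), (show ¬(70:Int) ≤ s by omega), PySem.Dict.modify, PySem.Dict.contains, PySem.Dict.insert, PySem.Dict.getD, PySem.Dict.get?_mk_cons]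
            rw [hA, ih]
            simp only [hcnt, hlen]
            rw [if_neg (by omega), if_neg (by omega), if_neg (by omega), if_pos (by omega)]
            norm_num; omega
          · have hA : pdStepA (PySem.Dict.mk [("90-100", a), ("80-89", b), ("70-79", c), ("60-69", d), ("<60", e)]) s = PySem.Dict.mk [("90-100", a), ("80-89", b), ("70-79", c), ("60-69", d), ("<60", e + 1)] := by
              simp [pdStepA, (show ¬(90:Int) ≤ s by omega), (show ¬(80:Int) ≤ s by omega), (show ¬(70:Int) ≤ s by omega), (show ¬(60:Int) ≤ s by omega), PySem.Dict.modify, PySem.Dict.contains, PySem.Dict.insert, PySem.Dict.getD, PySem.Dict.get?_mk_cons]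
            rw [hA, ih]
            simp only [hcnt, hlen]
            rw [if_neg (by omega), if_neg (by omega), if_neg (by omega), if_neg (by omega)]
            norm_num; omega

-- ===== VERDICT (by name: the statement is the Claim_ definition above) =====
theorem percentage_distribution_spec : Claim_equal_percentage_distribution := by
  intro scores _
  show percentage_distribution scores = percentage_distribution_alt scores
  simp only [percentage_distribution, percentage_distribution_alt]
  have := pd_loop_eq scores 0 0 0 0 0
  simp only [zero_add] at this
  exact this
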